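-- pv_equiv track=rewrite | github.com/AdmiJW/Python | Topics/Hackerrank/Easy/Missing Numbers.py | missingNumbers
-- ===== SOURCE A (Python) =====
-- from collections import Counter
--
-- def missingNumbers(arr, brr):
--     ac = Counter(arr)
--     bc = Counter(brr)
--     res = []
--     for i in sorted(bc.keys()):
--         if bc[i] > ac[i]:
--             res.append(i)
--     return res
-- ===== SOURCE B (Python) =====
-- def missingNumbers(arr, brr):
--     sa = sorted(arr)
--     sb = sorted(brr)
--     res = []
--     i = j = 0
--     la, lb = len(sa), len(sb)
--     while j < lb:
--         v = sb[j]
--         while i < la and sa[i] < v: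
--             i += 1
--         ac = 0
--         while i < la and sa[i] == v:
--             i += 1
--             ac += 1
--         bc = 0
--         while j < lb and sb[j] == v:
--             j += 1
--             bc += 1
--         if bc > ac:
--             res.append(v)
--     return res
-- ===== Notes on version B (the rewrite author's own statement) =====
-- stated objective: alternative
-- what changed: Replaces the two Counter hash maps and the sort over distinct keys by sorting both input lists once and walking them with a two-pointer merge that compares consecutive run lengths; no Counter or dict is used and the result comes out sorted by construction.
import Mathlib
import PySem

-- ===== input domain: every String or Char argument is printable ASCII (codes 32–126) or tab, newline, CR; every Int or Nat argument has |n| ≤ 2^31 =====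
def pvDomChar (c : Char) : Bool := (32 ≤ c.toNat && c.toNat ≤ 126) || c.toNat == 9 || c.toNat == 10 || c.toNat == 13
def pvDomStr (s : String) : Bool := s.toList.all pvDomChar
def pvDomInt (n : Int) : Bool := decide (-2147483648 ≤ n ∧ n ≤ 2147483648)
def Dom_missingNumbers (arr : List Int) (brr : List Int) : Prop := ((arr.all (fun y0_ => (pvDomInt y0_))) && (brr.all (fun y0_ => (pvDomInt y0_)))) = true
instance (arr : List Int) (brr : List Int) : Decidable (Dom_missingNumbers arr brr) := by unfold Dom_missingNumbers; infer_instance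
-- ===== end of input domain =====

-- B sorts both lists and merges them with a two-pointer run scan instead of building two Counters; same return value, no speed claim.

-- ===== PORT A =====
def missingNumbers (arr : List Int) (brr : List Int) : List Int :=
  let ac := PySem.Dict.counter arr
  let bc := PySem.Dict.counter brr
  (PySem.List.sorted bc.keys (fun x => x) false).foldl
    (fun res i => if bc.getD i 0 > ac.getD i 0 then res ++ [i] else res) []

-- ===== PORT B =====
-- outer `while j < lb` loop of Source B: the remaining suffix of sb is the argument,
-- the remaining suffix of sa is the state threaded through; the three inner
-- `while` loops are the dropWhile/takeWhile scans over the suffixes.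
def missingNumbersGo (sa : List Int) : List Int → List Int
  | [] => []
  | v :: t =>
      let sa1 := sa.dropWhile (fun x => decide (x < v))        -- while sa[i] < v: i += 1
      let ac := (sa1.takeWhile (fun x => x == v)).length        -- while sa[i] == v: ac += 1
      let sa2 := sa1.dropWhile (fun x => x == v)
      let bc := (t.takeWhile (fun x => x == v)).length + 1      -- while sb[j] == v: bc += 1
      let rest := t.dropWhile (fun x => x == v)
      if bc > ac then v :: missingNumbersGo sa2 rest else missingNumbersGo sa2 rest
termination_by sb => sb.length
decreasing_by
  all_goals
    exact Nat.lt_succ_of_le (List.length_dropWhile_le _ _)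

def missingNumbers_alt (arr : List Int) (brr : List Int) : List Int :=
  missingNumbersGo (PySem.List.sorted arr (fun x => x) false)
    (PySem.List.sorted brr (fun x => x) false)

-- ===== PRECONDITION & SPEC =====
def Spec_missingNumbers (arr : List Int) (brr : List Int) (out : List Int) : Prop := out = missingNumbers_alt arr brr
instance (arr : List Int) (brr : List Int) (out : List Int) : Decidable (Spec_missingNumbers arr brr out) := by unfold Spec_missingNumbers; infer_instance

-- ===== CLAIM (what is proved, stated in full; the proofs are below) =====
def Claim_equal_missingNumbers : Prop := ∀ (arr : List Int) (brr : List Int), Dom_missingNumbers arr brr → Spec_missingNumbers arr brr (missingNumbers arr brr)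

-- ===== LEMMAS AND PROOFS =====

-- after dropping the leading run of v's from a sorted list all of whose elements are ≥ v, everything left is > v
lemma pvDropRunGt (v : Int) (t : List Int) :
    t.Pairwise (· ≤ ·) → (∀ x ∈ t, v ≤ x) →
    ∀ x ∈ t.dropWhile (fun x => x == v), v < x := by
  induction t with
  | nil => intro _ _ x hx; simp at hx
  | cons a t ih =>
    intro hp hge x hx
    by_cases ha : a = v
    · subst ha
      rw [List.dropWhile_cons_of_pos (by simp)] at hx
      exact ih hp.tail (fun y hy => hge y (List.mem_cons_of_mem _ hy)) x hx
    · rw [List.dropWhile_cons_of_neg (by simp [ha])] at hx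
      have hva : v < a := lt_of_le_of_ne (hge a List.mem_cons_self) (Ne.symm ha)
      rcases List.mem_cons.mp hx with rfl | hx'
      · exact hva
      · exact lt_of_lt_of_le hva (List.rel_of_pairwise_cons hp hx')

-- after dropping the elements < v from a sorted list, everything left is ≥ v
lemma pvDropLtGe (v : Int) (sa : List Int) :
    sa.Pairwise (· ≤ ·) →
    ∀ x ∈ sa.dropWhile (fun x => decide (x < v)), v ≤ x := by
  induction sa with
  | nil => intro _ x hx; simp at hx
  | cons a t ih =>
    intro hp x hx
    by_cases ha : a < v
    · rw [List.dropWhile_cons_of_pos (by simp [ha])] at hx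
      exact ih hp.tail x hx
    · rw [List.dropWhile_cons_of_neg (by simp [ha])] at hx
      have hva : v ≤ a := le_of_not_gt ha
      rcases List.mem_cons.mp hx with rfl | hx'
      · exact hva
      · exact le_trans hva (List.rel_of_pairwise_cons hp hx')

-- the multiplicity of v in a sorted list is the length of its consecutive run
lemma pvCountRun (v : Int) (sa : List Int) (hpa : sa.Pairwise (· ≤ ·)) :
    List.count v sa = ((sa.dropWhile (fun x => decide (x < v))).takeWhile (fun x => x == v)).length := by
  have hsa1p : (sa.dropWhile (fun x => decide (x < v))).Pairwise (· ≤ ·) :=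
    List.Pairwise.sublist (List.dropWhile_sublist _) hpa
  conv_lhs => rw [← List.takeWhile_append_dropWhile (p := fun x => decide (x < v)) (l := sa)]
  rw [List.count_append]
  have h0 : List.count v (sa.takeWhile (fun x => decide (x < v))) = 0 :=
    List.count_eq_zero.mpr (fun h => by simpa using List.mem_takeWhile_imp h)
  rw [h0, Nat.zero_add]
  conv_lhs => rw [← List.takeWhile_append_dropWhile (p := fun x => x == v)
                    (l := sa.dropWhile (fun x => decide (x < v)))]
  rw [List.count_append]
  have h1 : List.count v ((sa.dropWhile (fun x => decide (x < v))).takeWhile (fun x => x == v))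
      = ((sa.dropWhile (fun x => decide (x < v))).takeWhile (fun x => x == v)).length :=
    List.count_eq_length.mpr (fun b hb => (show b = v by simpa using List.mem_takeWhile_imp hb).symm)
  have h2 : List.count v ((sa.dropWhile (fun x => decide (x < v))).dropWhile (fun x => x == v)) = 0 :=
    List.count_eq_zero.mpr (fun h =>
      lt_irrefl v (pvDropRunGt v _ hsa1p (pvDropLtGe v sa hpa) v h))
  rw [h1, h2, Nat.add_zero]

-- dropping the elements ≤ v does not change the multiplicity of any u > v
lemma pvCountTail (v u : Int) (sa : List Int) (hvu : v < u) :
    List.count u ((sa.dropWhile (fun x => decide (x < v))).dropWhile (fun x => x == v))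
      = List.count u sa := by
  conv_rhs => rw [← List.takeWhile_append_dropWhile (p := fun x => decide (x < v)) (l := sa)]
  rw [List.count_append]
  have h0 : List.count u (sa.takeWhile (fun x => decide (x < v))) = 0 :=
    List.count_eq_zero.mpr (fun h => by
      have := List.mem_takeWhile_imp h
      simp only [decide_eq_true_eq] at this
      exact absurd hvu (not_lt.mpr (le_of_lt this)))
  rw [h0, Nat.zero_add]
  conv_rhs => rw [← List.takeWhile_append_dropWhile (p := fun x => x == v)
                    (l := sa.dropWhile (fun x => decide (x < v)))]
  rw [List.count_append]
  have h1 : List.count u ((sa.dropWhile (fun x => decide (x < v))).takeWhile (fun x => x == v)) = 0 :=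
    List.count_eq_zero.mpr (fun h => by
      have := List.mem_takeWhile_imp h
      simp only [beq_iff_eq] at this
      exact absurd (this ▸ hvu) (lt_irrefl u))
  rw [h1, Nat.zero_add]

-- the main run-merge invariant, by induction on the length of sb
lemma missingNumbersGo_eq_aux : ∀ (n : Nat) (sb : List Int), sb.length ≤ n →
    ∀ (sa : List Int), sb.Pairwise (· ≤ ·) → sa.Pairwise (· ≤ ·) →
    missingNumbersGo sa sb =
      (PySem.List.sorted (PySem.Set.ofList sb) (fun x => x) false).filter
        (fun v => decide (List.count v sa < List.count v sb)) := by
  intro n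
  induction n with
  | zero =>
    intro sb hlen sa _ _
    have : sb = [] := List.length_eq_zero_iff.mp (Nat.le_zero.mp hlen)
    subst this
    simp [missingNumbersGo]
  | succ n ih =>
    intro sb hlen sa hpb hpa
    cases sb with
    | nil => simp [missingNumbersGo]
    | cons v t =>
      have hpt : t.Pairwise (· ≤ ·) := hpb.tail
      have hvt : ∀ x ∈ t, v ≤ x := fun x hx => List.rel_of_pairwise_cons hpb hx
      have hsplit : t.takeWhile (fun x => x == v) ++ t.dropWhile (fun x => x == v) = t :=
        List.takeWhile_append_dropWhile
      have hrun_v : ∀ x ∈ t.takeWhile (fun x => x == v), x = v := fun x hx => by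
        simpa using List.mem_takeWhile_imp hx
      have hrest_gt : ∀ x ∈ t.dropWhile (fun x => x == v), v < x := pvDropRunGt v t hpt hvt
      have hrest_p : (t.dropWhile (fun x => x == v)).Pairwise (· ≤ ·) :=
        List.Pairwise.sublist (List.dropWhile_sublist _) hpt
      have hsa1_p : (sa.dropWhile (fun x => decide (x < v))).Pairwise (· ≤ ·) :=
        List.Pairwise.sublist (List.dropWhile_sublist _) hpa
      have hsa2_p : ((sa.dropWhile (fun x => decide (x < v))).dropWhile (fun x => x == v)).Pairwise (· ≤ ·) :=
        List.Pairwise.sublist (List.dropWhile_sublist _) hsa1_p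
      -- multiplicity of v on both sides
      have hcount_run : List.count v (t.takeWhile (fun x => x == v)) = (t.takeWhile (fun x => x == v)).length :=
        List.count_eq_length.mpr (fun b hb => (hrun_v b hb).symm)
      have hcount_rest0 : List.count v (t.dropWhile (fun x => x == v)) = 0 :=
        List.count_eq_zero.mpr (fun h => lt_irrefl v (hrest_gt v h))
      have hcvsb : List.count v (v :: t) = (t.takeWhile (fun x => x == v)).length + 1 := by
        rw [List.count_cons_self]
        conv_lhs => rw [← hsplit]
        rw [List.count_append, hcount_run, hcount_rest0]
      have hcvsa : List.count v sa
          = ((sa.dropWhile (fun x => decide (x < v))).takeWhile (fun x => x == v)).length :=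
        pvCountRun v sa hpa
      -- the head of the sorted distinct values of (v :: t) is v, the tail is that of rest
      have hmem_srest : ∀ x, x ∈ PySem.List.sorted (PySem.Set.ofList (t.dropWhile (fun x => x == v))) (fun x => x) false
          ↔ x ∈ t.dropWhile (fun x => x == v) := by
        intro x; rw [PySem.List.mem_sorted, PySem.Set.mem_ofList]
      have hnodup_rest : (PySem.List.sorted (PySem.Set.ofList (t.dropWhile (fun x => x == v))) (fun x => x) false).Nodup :=
        ((PySem.List.sorted_perm _ _ _).nodup_iff).mpr (PySem.Set.nodup_ofList _)
      have hperm : (v :: PySem.List.sorted (PySem.Set.ofList (t.dropWhile (fun x => x == v))) (fun x => x) false).Perm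
          (PySem.Set.ofList (v :: t)) := by
        apply (List.perm_ext_iff_of_nodup ?_ (PySem.Set.nodup_ofList _)).mpr
        · intro x
          simp only [List.mem_cons, hmem_srest, PySem.Set.mem_ofList]
          constructor
          · rintro (rfl | hx)
            · exact Or.inl rfl
            · exact Or.inr (by rw [← hsplit]; exact List.mem_append_right _ hx)
          · rintro (rfl | hx)
            · exact Or.inl rfl
            · rw [← hsplit] at hx
              rcases List.mem_append.mp hx with h | h
              · exact Or.inl (hrun_v x h)
              · exact Or.inr h
        · exact List.nodup_cons.mpr
            ⟨fun h => lt_irrefl v (hrest_gt v ((hmem_srest v).mp h)), hnodup_rest⟩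
      have hhead : PySem.List.sorted (PySem.Set.ofList (v :: t)) (fun x => x) false
          = v :: PySem.List.sorted (PySem.Set.ofList (t.dropWhile (fun x => x == v))) (fun x => x) false := by
        apply PySem.List.sorted_eq_of_perm_of_pairwise_lt _ _ _ hperm
        exact List.pairwise_cons.mpr
          ⟨fun x hx => hrest_gt x ((hmem_srest x).mp hx), PySem.List.sorted_ofList_pairwise_lt _⟩
      -- counts of later values are unchanged by consuming the v-runs
      have hfilter_tail :
          (PySem.List.sorted (PySem.Set.ofList (t.dropWhile (fun x => x == v))) (fun x => x) false).filter
              (fun u => decide (List.count u sa < List.count u (v :: t)))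
          = (PySem.List.sorted (PySem.Set.ofList (t.dropWhile (fun x => x == v))) (fun x => x) false).filter
              (fun u => decide (List.count u ((sa.dropWhile (fun x => decide (x < v))).dropWhile (fun x => x == v))
                < List.count u (t.dropWhile (fun x => x == v)))) := by
        apply List.filter_congr
        intro x hx
        have hgt : v < x := hrest_gt x ((hmem_srest x).mp hx)
        have h1 : List.count x ((sa.dropWhile (fun x => decide (x < v))).dropWhile (fun x => x == v))
            = List.count x sa := pvCountTail v x sa hgt
        have hxa : List.count x (t.takeWhile (fun x => x == v)) = 0 :=
          List.count_eq_zero.mpr (fun h => absurd (hrun_v x h ▸ hgt) (lt_irrefl v))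
        have hct : List.count x t = List.count x (t.dropWhile (fun x => x == v)) := by
          conv_lhs => rw [← hsplit]
          rw [List.count_append, hxa, Nat.zero_add]
        have h2 : List.count x (v :: t) = List.count x (t.dropWhile (fun x => x == v)) := by
          simp [hct, ne_of_lt hgt]
        rw [h1, h2]
      -- IH on the rest
      have hlen' : (t.dropWhile (fun x => x == v)).length ≤ n :=
        le_trans (List.length_dropWhile_le _ _) (Nat.le_of_succ_le_succ hlen)
      have hih := ih (t.dropWhile (fun x => x == v)) hlen'
        ((sa.dropWhile (fun x => decide (x < v))).dropWhile (fun x => x == v)) hrest_p hsa2_p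
      -- assemble
      rw [missingNumbersGo, hhead, List.filter_cons, hfilter_tail, ← hih]
      simp only [decide_eq_true_eq, hcvsa, hcvsb]

-- A computed as a filter of the ascending distinct values of brr
lemma missingNumbers_eq_filter (arr brr : List Int) :
    missingNumbers arr brr =
      (PySem.List.sorted (PySem.Set.ofList brr) (fun x => x) false).filter
        (fun v => decide (List.count v arr < List.count v brr)) := by
  show (PySem.List.sorted (PySem.Dict.counter brr).keys (fun x => x) false).foldl
      (fun res i => if (PySem.Dict.counter brr).getD i 0 > (PySem.Dict.counter arr).getD i 0
        then res ++ [i] else res) [] = _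
  have hfun : (fun (res : List Int) (i : Int) =>
        if (PySem.Dict.counter brr).getD i 0 > (PySem.Dict.counter arr).getD i 0 then res ++ [i] else res)
      = (fun res i => if (fun v => decide (List.count v arr < List.count v brr)) i = true
          then res ++ [(fun x : Int => x) i] else res) := by
    funext res i
    simp [PySem.Dict.getD_counter, gt_iff_lt, Nat.cast_lt]
  rw [PySem.Dict.keys_counter, hfun, PySem.List.foldl_append_if]
  simp

-- ===== VERDICT (by name: the statement is the Claim_ definition above) =====
theorem missingNumbers_spec : Claim_equal_missingNumbers := by
  intro arr brr _
  unfold Spec_missingNumbers missingNumbers_alt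
  rw [missingNumbers_eq_filter]
  rw [missingNumbersGo_eq_aux (PySem.List.sorted brr (fun x => x) false).length _ le_rfl _
      (PySem.List.sorted_pairwise brr (fun x => x)) (PySem.List.sorted_pairwise arr (fun x => x))]
  have hofl : (PySem.Set.ofList (PySem.List.sorted brr (fun x => x) false)).Perm (PySem.Set.ofList brr) := by
    apply (List.perm_ext_iff_of_nodup (PySem.Set.nodup_ofList _) (PySem.Set.nodup_ofList _)).mpr
    intro x
    rw [PySem.Set.mem_ofList, PySem.Set.mem_ofList, PySem.List.mem_sorted]
  rw [PySem.List.sorted_eq_sorted_of_perm _ _ _ (fun a b h => h) hofl]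
  apply List.filter_congr
  intro x _
  rw [(PySem.List.sorted_perm brr (fun x => x) false).count_eq,
      (PySem.List.sorted_perm arr (fun x => x) false).count_eq]
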